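-- pv_equiv track=rewrite | github.com/gabriellaec/desoft-analise-exercicios | backup/user_111/ch151_2020_04_13_20_45_54_568942.py | estritamente_decrescente
-- ===== SOURCE A (Python) =====
-- def estritamente_decrescente(lista_numeros2):
--     if lista_numeros2==[]:
--         return []
--     x=1
--     num2=len(lista_numeros2)
--     lista_numeros3=[lista_numeros2[0]]
--     while x<num2:
--         if lista_numeros2[x]<lista_numeros3[len(lista_numeros3)-1]:
--             lista_numeros3.append(lista_numeros2[x])
--             x+=1
--         else:
--             x+=1
--     return lista_numeros3
-- ===== SOURCE B (Python) =====
-- def estritamente_decrescente(lista_numeros2):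
--     if not lista_numeros2:
--         return []
--     # pass 1: prefix-minimum table (mins[i] = min of lista_numeros2[0..i])
--     mins = [lista_numeros2[0]]
--     for v in lista_numeros2[1:]:
--         mins.append(min(mins[-1], v))
--     # pass 2: keep the head, then every element strictly below the prefix-min before it
--     return [lista_numeros2[0]] + [v for m, v in zip(mins, lista_numeros2[1:]) if v < m]
-- ===== Notes on version B (the rewrite author's own statement) =====
-- stated objective: alternative
-- what changed: A decides each element inline against the last element of the result list it is building; B makes two separate passes: it first materialises a prefix-minimum table and then filters each element against the prefix-min of the preceding positions.
import Mathlib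
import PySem

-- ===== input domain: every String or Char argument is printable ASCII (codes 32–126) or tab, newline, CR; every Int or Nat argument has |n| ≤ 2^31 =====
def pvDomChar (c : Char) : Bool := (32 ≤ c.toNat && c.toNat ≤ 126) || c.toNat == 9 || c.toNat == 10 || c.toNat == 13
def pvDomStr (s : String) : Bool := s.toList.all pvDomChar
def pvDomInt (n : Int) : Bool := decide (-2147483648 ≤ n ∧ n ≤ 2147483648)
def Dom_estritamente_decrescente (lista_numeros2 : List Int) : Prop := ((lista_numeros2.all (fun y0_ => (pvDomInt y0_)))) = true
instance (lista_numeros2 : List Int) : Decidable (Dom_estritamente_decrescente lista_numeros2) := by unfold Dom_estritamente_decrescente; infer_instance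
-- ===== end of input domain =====

-- B replaces A's inline compare-against-last-kept loop by a two-pass scheme:
-- a prefix-minimum table, then a filter of each element against the prefix-min
-- before it (objective: alternative decomposition, same cost).

-- ===== PORT A =====
-- while loop over x = 1 .. num2-1 ported as a foldl over that range, state = lista_numeros3
def estritamente_decrescente (lista_numeros2 : List Int) : List Int :=
  if lista_numeros2 = [] then []
  else
    let num2 : Int := lista_numeros2.length
    let init : List Int := [PySem.List.pyGetD lista_numeros2 0 0]
    (PySem.List.pyRange 1 num2 1).foldl
      (fun lista_numeros3 x =>
        if PySem.List.pyGetD lista_numeros2 x 0 <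
            PySem.List.pyGetD lista_numeros3 ((lista_numeros3.length : Int) - 1) 0 then
          lista_numeros3 ++ [PySem.List.pyGetD lista_numeros2 x 0]
        else lista_numeros3) init

-- ===== PORT B =====
-- pass 1 of Source B: the appended tail of the prefix-minimum table (m = mins[-1] carried along)
def pvPrefMins (m : Int) : List Int → List Int
  | [] => []
  | v :: rest => min m v :: pvPrefMins (min m v) rest

def estritamente_decrescente_alt (lista_numeros2 : List Int) : List Int :=
  match lista_numeros2 with
  | [] => []
  | a :: rest =>
    let mins : List Int := a :: pvPrefMins a rest
    a :: (mins.zip rest).filterMap (fun p => if p.2 < p.1 then some p.2 else none)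

-- ===== PRECONDITION & SPEC =====
def Spec_estritamente_decrescente (lista_numeros2 : List Int) (out : List Int) : Prop := out = estritamente_decrescente_alt lista_numeros2
instance (lista_numeros2 : List Int) (out : List Int) : Decidable (Spec_estritamente_decrescente lista_numeros2 out) := by unfold Spec_estritamente_decrescente; infer_instance

-- ===== CLAIM (what is proved, stated in full; the proofs are below) =====
def Claim_equal_estritamente_decrescente : Prop := ∀ (lista_numeros2 : List Int), Dom_estritamente_decrescente lista_numeros2 → Spec_estritamente_decrescente lista_numeros2 (estritamente_decrescente lista_numeros2)

-- ===== LEMMAS AND PROOFS =====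

-- lista_numeros3[len(lista_numeros3)-1] is the last element of a nonempty list
theorem pvPyGetD_last (res : List Int) (h : res ≠ []) :
    PySem.List.pyGetD res ((res.length : Int) - 1) 0 = res.getLast h := by
  have hlen : 1 ≤ res.length := List.length_pos_of_ne_nil h
  rw [PySem.List.pyGetD_eq_getElem res 0 (by omega) (by omega)]
  rw [List.getLast_eq_getElem]
  congr 1
  omega

-- loop invariant: with last kept element m, A's remaining loop appends exactly
-- the elements of t strictly below the running prefix minimum
theorem pv_loop (t : List Int) : ∀ (res : List Int) (h : res ≠ []) (m : Int),
    res.getLast h = m →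
    t.foldl
      (fun res v =>
        if v < PySem.List.pyGetD res ((res.length : Int) - 1) 0 then res ++ [v] else res) res
      = res ++ ((m :: pvPrefMins m t).zip t).filterMap
          (fun p => if p.2 < p.1 then some p.2 else none) := by
  induction t with
  | nil => intro res h m _; simp
  | cons v rest ih =>
    intro res h m hm
    have hlast : PySem.List.pyGetD res ((res.length : Int) - 1) 0 = m := by
      rw [pvPyGetD_last res h, hm]
    simp only [List.foldl_cons, List.zip_cons_cons, List.filterMap_cons, hlast]
    by_cases hv : v < m
    · have hmin : min m v = v := by omega
      have hlast' : (res ++ [v]).getLast (by simp) = v := by simp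
      rw [if_pos hv, ih (res ++ [v]) (by simp) v hlast']
      simp [pvPrefMins, hmin, hv]
    · have hmin : min m v = m := by omega
      rw [if_neg hv, ih res h m hm]
      simp [pvPrefMins, hmin, hv]

-- ===== VERDICT (by name: the statement is the Claim_ definition above) =====
theorem estritamente_decrescente_spec : Claim_equal_estritamente_decrescente := by
  intro l _
  unfold Spec_estritamente_decrescente estritamente_decrescente estritamente_decrescente_alt
  cases l with
  | nil => simp
  | cons a rest =>
    simp only [if_neg (List.cons_ne_nil a rest)]
    rw [PySem.List.foldl_pyRange_pyGetD' (a := 1) (xs := a :: rest) (d := 0)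
      (f := fun res v =>
        if v < PySem.List.pyGetD res ((res.length : Int) - 1) 0 then res ++ [v] else res)
      (init := [PySem.List.pyGetD (a :: rest) 0 0]) (by omega)]
    simp only [PySem.List.pyGetD_zero_cons, Int.toNat_one, List.drop_succ_cons, List.drop_zero]
    rw [pv_loop rest [a] (by simp) a (by simp)]
    simp
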